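-- pv_equiv track=rewrite | github.com/Garbarkozaurus/advent-of-code-2023 | src/day03.py | number_starts_and_ends
-- ===== SOURCE A (Python) =====
-- def number_starts_and_ends(line: str) -> list[tuple[int, int]]:
--     ret = []
--     within_number = False
--     number_start = None
--     for i, c in enumerate(line):
--         if c.isdigit():
--             if not within_number:
--                 within_number = True
--                 number_start = i
--             else:
--                 continue
--         elif within_number:
--             within_number = False
--             number_end = i - 1
--             ret.append((number_start, number_end))
--     # to include numbers that end at the end of the line
--     if within_number:
--         ret.append((number_start, len(line)-1))
--     return ret
-- ===== SOURCE B (Python) =====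
-- def number_starts_and_ends(line: str) -> list[tuple[int, int]]:
--     # run-skipping scan: find each maximal digit run and jump past it
--     ret = []
--     i = 0
--     n = len(line)
--     while i < n:
--         if line[i].isdigit():
--             j = i
--             while j + 1 < n and line[j + 1].isdigit():
--                 j += 1
--             ret.append((i, j))
--             i = j + 1
--         else:
--             i += 1
--     return ret
-- ===== Notes on version B (the rewrite author's own statement) =====
-- stated objective: alternative
-- what changed: Replaces the per-character within_number/number_start state machine with a run-skipping scan: an outer loop over maximal digit runs and an inner scan that finds each run's end, emitting (start, end) directly and jumping past the run.
import Mathlib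
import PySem

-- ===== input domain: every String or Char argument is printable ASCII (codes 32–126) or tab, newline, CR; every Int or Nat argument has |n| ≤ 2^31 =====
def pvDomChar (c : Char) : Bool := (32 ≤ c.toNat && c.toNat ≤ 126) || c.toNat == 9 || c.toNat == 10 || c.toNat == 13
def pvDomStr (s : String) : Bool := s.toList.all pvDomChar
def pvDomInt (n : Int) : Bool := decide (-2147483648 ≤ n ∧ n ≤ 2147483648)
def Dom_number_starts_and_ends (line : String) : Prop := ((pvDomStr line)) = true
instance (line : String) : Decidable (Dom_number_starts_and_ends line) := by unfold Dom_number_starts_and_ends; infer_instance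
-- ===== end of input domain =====

-- B replaces A's per-character within_number/number_start state machine by a run-skipping scan
-- (outer loop over maximal digit runs, inner scan to each run's end); alternative structure, same cost.

-- ===== PORT A =====
-- one loop iteration of A: state = (ret, within_number, number_start)
def pvStepA (s : List (Int × Int) × Bool × Option Int) (p : Int × Char) :
    List (Int × Int) × Bool × Option Int :=
  if PySem.Chars.isdigit p.2 then
    if !s.2.1 then (s.1, true, some p.1) else s
  else if s.2.1 then (s.1 ++ [(s.2.2.getD 0, p.1 - 1)], false, s.2.2)
  else s
  -- (number_start is never None while within_number is true, so the .getD 0 default is never the value used)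

def number_starts_and_ends (line : String) : List (Int × Int) :=
  let r := (PySem.List.enumerate line.toList 0).foldl pvStepA ([], false, none)
  if r.2.1 then r.1 ++ [(r.2.2.getD 0, PySem.Str.len line - 1)] else r.1

-- ===== PORT B =====
-- inner while loop of B: how many further digits follow (j - i)
def pvRunLen : List Char → Nat
  | [] => 0
  | c :: cs => if PySem.Chars.isdigit c then pvRunLen cs + 1 else 0

-- outer while loop of B, i = index of the head of cs in the original line
def pvScan (i : Int) (cs : List Char) : List (Int × Int) :=
  match cs with
  | [] => []
  | c :: rest =>
    if PySem.Chars.isdigit c then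
      (i, i + pvRunLen rest) :: pvScan (i + pvRunLen rest + 1) (rest.drop (pvRunLen rest))
    else pvScan (i + 1) rest
termination_by cs.length
decreasing_by
  · simp only [List.length_drop, List.length_cons]; omega
  · simp only [List.length_cons]; omega

def number_starts_and_ends_alt (line : String) : List (Int × Int) := pvScan 0 line.toList

-- ===== PRECONDITION & SPEC =====
def Spec_number_starts_and_ends (line : String) (out : List (Int × Int)) : Prop := out = number_starts_and_ends_alt line
instance (line : String) (out : List (Int × Int)) : Decidable (Spec_number_starts_and_ends line out) := by unfold Spec_number_starts_and_ends; infer_instance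

-- ===== CLAIM (what is proved, stated in full; the proofs are below) =====
def Claim_equal_number_starts_and_ends : Prop := ∀ (line : String), Dom_number_starts_and_ends line → Spec_number_starts_and_ends line (number_starts_and_ends line)

-- ===== LEMMAS AND PROOFS =====

-- A's remaining computation from an arbitrary state, over the suffix cs starting at index i
def pvF (ret : List (Int × Int)) (w : Bool) (st : Option Int) (i : Int) (cs : List Char) :
    List (Int × Int) :=
  let r := (PySem.List.enumerate cs i).foldl pvStepA (ret, w, st)
  if r.2.1 then r.1 ++ [(r.2.2.getD 0, i + cs.length - 1)] else r.1

lemma pvF_nil (ret : List (Int × Int)) (w : Bool) (st : Option Int) (i : Int) :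
    pvF ret w st i [] = if w then ret ++ [(st.getD 0, i - 1)] else ret := by
  simp [pvF, PySem.List.enumerate]

lemma pvF_cons (ret : List (Int × Int)) (w : Bool) (st : Option Int) (i : Int)
    (c : Char) (cs : List Char) :
    pvF ret w st i (c :: cs) =
      pvF (pvStepA (ret, w, st) (i, c)).1 (pvStepA (ret, w, st) (i, c)).2.1
        (pvStepA (ret, w, st) (i, c)).2.2 (i + 1) cs := by
  simp only [pvF, PySem.List.enumerate_cons, List.foldl_cons]
  have h : i + ((c :: cs).length : Int) - 1 = (i + 1) + (cs.length : Int) - 1 := by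
    simp only [List.length_cons]; push_cast; ring
  rw [h]

lemma pvStepA_dig_out (ret : List (Int × Int)) (st : Option Int) (i : Int) (c : Char)
    (hc : PySem.Chars.isdigit c = true) :
    pvStepA (ret, false, st) (i, c) = (ret, true, some i) := by simp [pvStepA, hc]

lemma pvStepA_dig_in (ret : List (Int × Int)) (st : Option Int) (i : Int) (c : Char)
    (hc : PySem.Chars.isdigit c = true) :
    pvStepA (ret, true, st) (i, c) = (ret, true, st) := by simp [pvStepA, hc]

lemma pvStepA_nondig_out (ret : List (Int × Int)) (st : Option Int) (i : Int) (c : Char)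
    (hc : ¬ PySem.Chars.isdigit c = true) :
    pvStepA (ret, false, st) (i, c) = (ret, false, st) := by simp [pvStepA, hc]

lemma pvStepA_nondig_in (ret : List (Int × Int)) (st : Option Int) (i : Int) (c : Char)
    (hc : ¬ PySem.Chars.isdigit c = true) :
    pvStepA (ret, true, st) (i, c) = (ret ++ [(st.getD 0, i - 1)], false, st) := by
  simp [pvStepA, hc]

-- the first character past the maximal digit run is not a digit
lemma pvRunLen_head (cs : List Char) (d : Char) (rest' : List Char)
    (h : cs.drop (pvRunLen cs) = d :: rest') : PySem.Chars.isdigit d = false := by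
  induction cs generalizing d rest' with
  | nil => simp at h
  | cons c cs ih =>
    by_cases hc : PySem.Chars.isdigit c
    · rw [show pvRunLen (c :: cs) = pvRunLen cs + 1 from by simp [pvRunLen, hc],
        List.drop_succ_cons] at h
      exact ih d rest' h
    · rw [show pvRunLen (c :: cs) = 0 from by simp [pvRunLen, hc], List.drop_zero] at h
      cases h
      simpa using hc

-- moving one step past the maximal run's boundary character changes nothing
lemma pvScan_drop_runLen (j : Int) (rest : List Char) :
    pvScan j (rest.drop (pvRunLen rest)) = pvScan (j + 1) (rest.drop (pvRunLen rest + 1)) := by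
  have hdd : rest.drop (pvRunLen rest + 1) = (rest.drop (pvRunLen rest)).drop 1 := by
    rw [List.drop_drop]
  cases e : rest.drop (pvRunLen rest) with
  | nil => rw [hdd, e]; simp [pvScan]
  | cons d rest' =>
    have hd := pvRunLen_head rest d rest' e
    rw [hdd, e, pvScan]
    simp [hd]

-- the joint invariant: A's fold from either mode equals B's run-skipping scan
lemma pvMain (cs : List Char) :
    (∀ (i : Int) (ret : List (Int × Int)) (st : Option Int),
        pvF ret false st i cs = ret ++ pvScan i cs) ∧
    (∀ (i : Int) (ret : List (Int × Int)) (s : Int),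
        pvF ret true (some s) i cs =
          ret ++ (s, i + pvRunLen cs - 1) ::
            pvScan (i + pvRunLen cs + 1) (cs.drop (pvRunLen cs + 1))) := by
  induction cs with
  | nil =>
    constructor
    · intro i ret st; rw [pvScan]; simp [pvF_nil]
    · intro i ret s; rw [pvF_nil]; simp [pvRunLen, pvScan]
  | cons c rest ih =>
    obtain ⟨ihOut, ihIn⟩ := ih
    constructor
    · intro i ret st
      by_cases hc : PySem.Chars.isdigit c
      · rw [pvF_cons, pvStepA_dig_out ret st i c hc, pvScan, if_pos hc,
          ihIn (i + 1) ret i]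
        have h1 : (i + 1) + (pvRunLen rest : Int) - 1 = i + pvRunLen rest := by ring
        have h2 : (i + 1) + (pvRunLen rest : Int) + 1 = (i + pvRunLen rest + 1) + 1 := by ring
        rw [h1, h2, ← pvScan_drop_runLen (i + pvRunLen rest + 1) rest]
      · rw [pvF_cons, pvStepA_nondig_out ret st i c hc, pvScan, if_neg hc]
        exact ihOut (i + 1) ret st
    · intro i ret s
      by_cases hc : PySem.Chars.isdigit c
      · rw [pvF_cons, pvStepA_dig_in ret (some s) i c hc, ihIn (i + 1) ret s,
          show pvRunLen (c :: rest) = pvRunLen rest + 1 from by simp [pvRunLen, hc],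
          List.drop_succ_cons]
        have h1 : (i + 1) + (pvRunLen rest : Int) - 1 = i + ((pvRunLen rest + 1 : Nat) : Int) - 1 := by
          push_cast; ring
        have h2 : (i + 1) + (pvRunLen rest : Int) + 1 = i + ((pvRunLen rest + 1 : Nat) : Int) + 1 := by
          push_cast; ring
        rw [h1, h2]
      · rw [pvF_cons, pvStepA_nondig_in ret (some s) i c hc,
          ihOut (i + 1) (ret ++ [((some s).getD 0, i - 1)]) (some s),
          show pvRunLen (c :: rest) = 0 from by simp [pvRunLen, hc]]
        simp

-- ===== VERDICT (by name: the statement is the Claim_ definition above) =====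
theorem number_starts_and_ends_spec : Claim_equal_number_starts_and_ends := by
  intro line _
  unfold Spec_number_starts_and_ends number_starts_and_ends number_starts_and_ends_alt
  have h := (pvMain line.toList).1 0 [] none
  unfold pvF at h
  simp only [PySem.Str.len_eq] at *
  simpa using h
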